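-- pv_equiv track=rewrite | github.com/amuralle/SmallBioinformaticPrograms | exactSetMatch.py | hashSeq
-- ===== SOURCE A (Python) =====
-- def hashSeq(Kmer):
--     hash = 0
--     for char in Kmer:
--         hash = hash << 2
--         if char == 'C':
--             hash = hash + 0
--         if char == 'G':
--             hash = hash + 1
--         if char == 'A':
--             hash = hash + 2
--         if char == 'T':
--             hash = hash + 3
--     return hash
-- ===== SOURCE B (Python) =====
-- def hashSeq(Kmer):
--     d = {'C': 0, 'G': 1, 'A': 2, 'T': 3}
--     total = 0
--     weight = 1
--     for char in reversed(Kmer):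
--         total += d.get(char, 0) * weight
--         weight *= 4
--     return total
-- ===== Notes on version B (the rewrite author's own statement) =====
-- stated objective: alternative
-- what changed: Replaces Horner-style shift-and-add with an if-chain per character by a right-to-left positional base-4 sum: a digit dictionary with default 0 and an ascending power-of-4 weight accumulator (same number of loop iterations; slower in bignum terms on very long strings because of digit*weight big-integer products).
import Mathlib
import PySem

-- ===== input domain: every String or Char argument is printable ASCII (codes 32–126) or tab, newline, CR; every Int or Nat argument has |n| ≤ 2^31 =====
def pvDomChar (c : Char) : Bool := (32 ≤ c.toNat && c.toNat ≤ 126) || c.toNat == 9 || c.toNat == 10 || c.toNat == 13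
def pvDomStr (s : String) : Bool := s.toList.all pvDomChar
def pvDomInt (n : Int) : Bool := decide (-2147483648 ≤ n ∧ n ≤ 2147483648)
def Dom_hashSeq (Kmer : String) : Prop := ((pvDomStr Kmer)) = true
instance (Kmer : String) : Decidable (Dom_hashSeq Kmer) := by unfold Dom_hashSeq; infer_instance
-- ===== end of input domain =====

-- B replaces A's Horner shift-and-add (if-chain per character) by a right-to-left
-- base-4 positional sum with a digit dictionary; alternative decomposition, same cost.

-- ===== PORT A =====
-- one loop iteration of A: hash <<= 2, then the four independent ifs
def hashSeqStep (hash : Int) (char : Char) : Int :=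
  let hash := hash <<< (2 : Nat)
  let hash := if char = 'C' then hash + 0 else hash
  let hash := if char = 'G' then hash + 1 else hash
  let hash := if char = 'A' then hash + 2 else hash
  let hash := if char = 'T' then hash + 3 else hash
  hash

def hashSeq (Kmer : String) : Int :=
  Kmer.toList.foldl hashSeqStep 0

-- ===== PORT B =====
-- the digit dictionary d of Source B
def hashSeqDict : PySem.Dict Char Int :=
  PySem.Dict.ofList [('C', 0), ('G', 1), ('A', 2), ('T', 3)]

-- one loop iteration of B over reversed(Kmer): state (total, weight)
def hashSeqAltStep (st : Int × Int) (char : Char) : Int × Int :=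
  (st.1 + (hashSeqDict.getD char 0) * st.2, st.2 * 4)

def hashSeq_alt (Kmer : String) : Int :=
  (Kmer.toList.reverse.foldl hashSeqAltStep (0, 1)).1

-- ===== PRECONDITION & SPEC =====
def Spec_hashSeq (Kmer : String) (out : Int) : Prop := out = hashSeq_alt Kmer
instance (Kmer : String) (out : Int) : Decidable (Spec_hashSeq Kmer out) := by unfold Spec_hashSeq; infer_instance

-- ===== CLAIM (what is proved, stated in full; the proofs are below) =====
def Claim_equal_hashSeq : Prop := ∀ (Kmer : String), Dom_hashSeq Kmer → Spec_hashSeq Kmer (hashSeq Kmer)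

-- ===== LEMMAS AND PROOFS =====

-- A's if-chain step is shift plus B's dictionary digit
theorem hashSeqDict_getD (c : Char) :
    hashSeqDict.getD c 0 =
      if c = 'C' then 0 else if c = 'G' then 1 else if c = 'A' then 2
      else if c = 'T' then 3 else 0 := by
  by_cases h1 : c = 'C'
  · subst h1; decide
  by_cases h2 : c = 'G'
  · subst h2; decide
  by_cases h3 : c = 'A'
  · subst h3; decide
  by_cases h4 : c = 'T'
  · subst h4; decide
  have hd : hashSeqDict = PySem.Dict.mk [('C', 0), ('G', 1), ('A', 2), ('T', 3)] := by decide
  simp [hd, PySem.Dict.getD, PySem.Dict.get?, beq_iff_eq,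
    Ne.symm h1, Ne.symm h2, Ne.symm h3, Ne.symm h4, h1, h2, h3, h4]

theorem hashSeqStep_eq (h : Int) (c : Char) :
    hashSeqStep h c = h * 4 + hashSeqDict.getD c 0 := by
  have hs : h <<< (2 : Nat) = h * 4 := by rw [Int.shiftLeft_eq]; norm_num
  simp only [hashSeqStep, hashSeqDict_getD, hs]
  split_ifs with h1 h2 h3 h4 <;> simp_all

-- B's fold over the reversed list, rephrased as a foldr
theorem hashSeqAlt_foldr (l : List Char) :
    l.reverse.foldl hashSeqAltStep (0, 1) =
      l.foldr (fun c st => hashSeqAltStep st c) (0, 1) := by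
  rw [List.foldl_reverse]

-- the weight component of B's state is 4^length
theorem hashSeqAlt_snd (l : List Char) :
    (l.foldr (fun c st => hashSeqAltStep st c) ((0 : Int), (1 : Int))).2 = 4 ^ l.length := by
  induction l with
  | nil => simp
  | cons c l ih =>
      rw [List.foldr_cons, List.length_cons, pow_succ, ← ih]
      rfl

-- main invariant: A's fold from any accumulator equals h·4^n plus B's total
theorem hashSeq_invariant (l : List Char) (h : Int) :
    l.foldl hashSeqStep h =
      h * 4 ^ l.length + (l.foldr (fun c st => hashSeqAltStep st c) ((0 : Int), (1 : Int))).1 := by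
  induction l generalizing h with
  | nil => simp
  | cons c l ih =>
      rw [List.foldl_cons, ih, hashSeqStep_eq, List.foldr_cons, List.length_cons, pow_succ]
      show _ = _ + ((l.foldr (fun c st => hashSeqAltStep st c) ((0:Int),(1:Int))).1
        + hashSeqDict.getD c 0 * (l.foldr (fun c st => hashSeqAltStep st c) ((0:Int),(1:Int))).2)
      rw [hashSeqAlt_snd]
      ring

-- ===== VERDICT (by name: the statement is the Claim_ definition above) =====
theorem hashSeq_spec : Claim_equal_hashSeq := by
  intro Kmer _
  unfold Spec_hashSeq hashSeq hashSeq_alt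
  rw [hashSeqAlt_foldr, hashSeq_invariant]
  simp
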